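-- pv_equiv track=rewrite | github.com/DngBack/DocSplitCluster | run_split_and_classify.py | page_end_to_chunks
-- ===== SOURCE A (Python) =====
-- from typing import TYPE_CHECKING, Any, Dict, List, Sequence, Tuple
--
-- def page_end_to_chunks(page_end_labels: Sequence[int]) -> List[Tuple[int, int]]:
--     chunks: List[Tuple[int, int]] = []
--     start = 0
--     for idx, flag in enumerate(page_end_labels):
--         if flag == 1:
--             chunks.append((start, idx))
--             start = idx + 1
--     if start < len(page_end_labels):
--         chunks.append((start, len(page_end_labels) - 1))
--     return chunks
-- ===== SOURCE B (Python) =====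
-- def page_end_to_chunks(page_end_labels):
--     # Recursive divide-at-first-boundary: locate the first flag 1, emit that
--     # chunk, and recurse on the remaining suffix with an updated offset.
--     def go(start, rest):
--         if not rest:
--             return []
--         if 1 not in rest:
--             return [(start, start + len(rest) - 1)]
--         k = rest.index(1)
--         return [(start, start + k)] + go(start + k + 1, rest[k + 1:])
--     return go(0, list(page_end_labels))
-- ===== Notes on version B (the rewrite author's own statement) =====
-- stated objective: alternative
-- what changed: B replaces A's fused enumerate-and-accumulate loop by a recursive divide-at-first-boundary algorithm: it finds the first flag via membership + list.index, emits that chunk, and recurses on the sliced suffix with an offset; no enumerate, no running start state.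
import Mathlib
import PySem

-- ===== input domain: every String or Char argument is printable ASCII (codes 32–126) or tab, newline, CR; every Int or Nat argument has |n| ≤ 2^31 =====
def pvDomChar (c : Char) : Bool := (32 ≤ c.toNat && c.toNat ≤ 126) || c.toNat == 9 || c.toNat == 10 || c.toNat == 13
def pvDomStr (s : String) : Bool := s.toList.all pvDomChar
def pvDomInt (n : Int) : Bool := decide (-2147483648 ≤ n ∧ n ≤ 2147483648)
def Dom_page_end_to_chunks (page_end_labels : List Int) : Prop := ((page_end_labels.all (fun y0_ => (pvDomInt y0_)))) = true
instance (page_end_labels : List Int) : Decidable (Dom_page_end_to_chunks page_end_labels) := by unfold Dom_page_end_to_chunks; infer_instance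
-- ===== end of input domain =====

-- B replaces A's fused enumerate-and-accumulate loop by a recursive divide-at-first-boundary
-- algorithm (membership + index + slice on the suffix); same results, different structure ('alternative').

-- ===== PORT A =====
-- for idx, flag in enumerate(...): if flag == 1: chunks.append((start, idx)); start = idx + 1
-- then: if start < len: chunks.append((start, len - 1))
def page_end_to_chunks (page_end_labels : List Int) : List (Int × Int) :=
  let st := (PySem.List.enumerate page_end_labels).foldl
      (fun (s : List (Int × Int) × Int) p =>
        if p.2 = 1 then (s.1 ++ [(s.2, p.1)], p.1 + 1) else s) ([], 0)
  if st.2 < (page_end_labels.length : Int) then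
    st.1 ++ [(st.2, (page_end_labels.length : Int) - 1)]
  else st.1

-- ===== PORT B =====
-- go(start, rest): empty → []; '1 not in rest' → single closing chunk; else k = rest.index(1),
-- emit (start, start+k) and recurse on rest[k+1:].  Python's '1 in rest' test plus rest.index(1)
-- are ported together as one match on PySem.List.index? (some k ↔ 1 ∈ rest with first index k).
def pvGoB (start : Int) (rest : List Int) : List (Int × Int) :=
  if hrest : rest = [] then []
  else
    match PySem.List.index? rest 1 with
    | none => [(start, start + (rest.length : Int) - 1)]
    | some k => [(start, start + (k : Int))] ++ pvGoB (start + (k : Int) + 1) (rest.drop (k + 1))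
termination_by rest.length
decreasing_by
  simp only [List.length_drop]
  have : rest.length ≠ 0 := fun h0 => hrest (List.eq_nil_of_length_eq_zero h0)
  omega

def page_end_to_chunks_alt (page_end_labels : List Int) : List (Int × Int) :=
  pvGoB 0 page_end_labels

-- ===== PRECONDITION & SPEC =====
def Spec_page_end_to_chunks (page_end_labels : List Int) (out : List (Int × Int)) : Prop := out = page_end_to_chunks_alt page_end_labels
instance (page_end_labels : List Int) (out : List (Int × Int)) : Decidable (Spec_page_end_to_chunks page_end_labels out) := by unfold Spec_page_end_to_chunks; infer_instance

-- ===== CLAIM (what is proved, stated in full; the proofs are below) =====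
def Claim_equal_page_end_to_chunks : Prop := ∀ (page_end_labels : List Int), Dom_page_end_to_chunks page_end_labels → Spec_page_end_to_chunks page_end_labels (page_end_to_chunks page_end_labels)

-- ===== LEMMAS AND PROOFS =====

-- A's loop body, named for the lemmas.
def pvStepA (s : List (Int × Int) × Int) (p : Int × Int) : List (Int × Int) × Int :=
  if p.2 = 1 then (s.1 ++ [(s.2, p.1)], p.1 + 1) else s

-- A flag-free prefix leaves A's loop state unchanged.
theorem pv_fold_no_flag (pre : List Int) (hpre : (1 : Int) ∉ pre) (i : Int)
    (st : List (Int × Int) × Int) :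
    (PySem.List.enumerate pre i).foldl pvStepA st = st := by
  induction pre generalizing i st with
  | nil => rfl
  | cons x xs ih =>
    have hx : x ≠ 1 := fun h => hpre (h ▸ List.mem_cons_self)
    rw [PySem.List.enumerate_cons]
    simp only [List.foldl_cons, pvStepA, if_neg hx]
    exact ih (fun h => hpre (List.mem_cons_of_mem _ h)) _ _

-- Core invariant: A's loop-then-tail-check from an aligned state (acc, i) over the suffix
-- starting at absolute index i equals acc ++ B's recursion on that suffix.
theorem pv_main (n : Nat) (rest : List Int) (hn : rest.length = n) (i : Nat)
    (acc : List (Int × Int)) :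
    (let st := (PySem.List.enumerate rest (i : Int)).foldl pvStepA (acc, (i : Int));
     if st.2 < (i : Int) + (rest.length : Int) then
       st.1 ++ [(st.2, (i : Int) + (rest.length : Int) - 1)]
     else st.1)
    = acc ++ pvGoB (i : Int) rest := by
  induction n using Nat.strong_induction_on generalizing rest i acc with
  | _ n ih =>
    match h : PySem.List.index? rest 1 with
    | none =>
      have hmem : (1 : Int) ∉ rest := (PySem.List.index?_eq_none_iff _ _).mp h
      rw [pv_fold_no_flag rest hmem]
      by_cases hrest : rest = []
      · subst hrest
        simp [pvGoB]
      · have hlen : 0 < rest.length := List.length_pos_iff.mpr hrest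
        rw [pvGoB, dif_neg hrest, h]
        simp only []
        rw [if_pos (by omega)]
    | some k =>
      obtain ⟨pre, suf, hsplit, hk, hnot⟩ := (PySem.List.index?_eq_some_iff _ _ _).mp h
      subst hk
      have hdrop : rest.drop (pre.length + 1) = suf := by
        subst hsplit
        rw [show pre ++ 1 :: suf = (pre ++ [1]) ++ suf by simp,
            show pre.length + 1 = (pre ++ [(1 : Int)]).length by simp]
        exact List.drop_left
      subst hsplit
      have hsuf : suf.length < n := by simp at hn; omega
      have key := ih suf.length hsuf suf rfl (i + pre.length + 1)
        (acc ++ [((i : Int), (i : Int) + (pre.length : Int))])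
      have hfold : (PySem.List.enumerate (pre ++ 1 :: suf) (i : Int)).foldl pvStepA (acc, (i : Int))
          = (PySem.List.enumerate suf ((i : Int) + (pre.length : Int) + 1)).foldl pvStepA
              (acc ++ [((i : Int), (i : Int) + (pre.length : Int))],
               (i : Int) + (pre.length : Int) + 1) := by
        rw [PySem.List.enumerate_append, List.foldl_append, pv_fold_no_flag pre hnot,
            PySem.List.enumerate_cons, List.foldl_cons]
        simp [pvStepA]
      simp only [hfold, List.length_append, List.length_cons]
      rw [pvGoB, dif_neg (by simp), h]
      simp only [hdrop]
      push_cast at key ⊢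
      ring_nf at key ⊢
      rw [key]
      simp

-- ===== VERDICT (by name: the statement is the Claim_ definition above) =====
theorem page_end_to_chunks_spec : Claim_equal_page_end_to_chunks := by
  intro ls _
  unfold Spec_page_end_to_chunks page_end_to_chunks page_end_to_chunks_alt
  have := pv_main ls.length ls rfl 0 []
  simpa [pvStepA] using this
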